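-- pv_equiv track=rewrite | github.com/Modiga/PythonStudia | czy_zero_zad_7.py | czy_wystepuje_zero
-- ===== SOURCE A (Python) =====
-- def czy_wystepuje_zero(tablica):
--     n = len(tablica)
--
--     # Sprawdzenie wierszy
--     for i in range(n):
--         if 0 not in tablica[i]:
--             return False
--
--     # Sprawdzenie kolumn
--     for j in range(n):
--         kolumna = [tablica[i][j] for i in range(n)]
--         if 0 not in kolumna:
--             return False
--
--     return True
-- ===== SOURCE B (Python) =====
-- def czy_wystepuje_zero(tablica):
--     rows_with_zero = set()
--     cols_with_zero = set()
--     for i, wiersz in enumerate(tablica):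
--         for j, v in enumerate(wiersz):
--             if v == 0:
--                 rows_with_zero.add(i)
--                 cols_with_zero.add(j)
--     n = len(tablica)
--     return (all(i in rows_with_zero for i in range(n)) and
--             all(j in cols_with_zero for j in range(n)))
-- ===== Notes on version B (the rewrite author's own statement) =====
-- stated objective: alternative
-- what changed: Replaced A's two-phase structure (row membership scan, then rebuilding each column as a list and scanning it) by a single pass over the cells that collects the sets of row and column indices containing a zero, followed by a membership check for every index; Pre_ excludes the ragged inputs on which A raises IndexError while rebuilding a column.
import Mathlib
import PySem

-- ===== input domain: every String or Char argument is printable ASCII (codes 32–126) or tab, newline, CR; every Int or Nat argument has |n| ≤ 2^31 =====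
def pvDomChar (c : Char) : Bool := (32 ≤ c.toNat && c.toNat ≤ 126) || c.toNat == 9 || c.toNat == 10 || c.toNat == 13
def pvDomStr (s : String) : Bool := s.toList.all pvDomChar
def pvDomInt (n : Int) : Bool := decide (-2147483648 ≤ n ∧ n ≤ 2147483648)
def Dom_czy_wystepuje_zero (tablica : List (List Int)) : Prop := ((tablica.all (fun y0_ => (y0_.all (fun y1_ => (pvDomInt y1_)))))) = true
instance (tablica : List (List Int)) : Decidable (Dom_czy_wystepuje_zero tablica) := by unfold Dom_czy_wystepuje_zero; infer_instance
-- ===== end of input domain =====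

-- B replaces A's two-phase row-scan-then-column-rebuild by a single pass over the cells
-- collecting the sets of row/column indices that contain a zero, then a membership check
-- for every index (objective: alternative).

-- ===== PORT A =====
-- tablica[i][j] is ported as pyGetD … 1; Pre_ excludes the inputs where Python raises IndexError,
-- so the default 1 is never the value on admitted inputs.
def czy_wystepuje_zero (tablica : List (List Int)) : Bool :=
  let n : Int := (tablica.length : Int)
  if (PySem.List.pyRange 0 n 1).all
      (fun i => decide ((0:Int) ∈ PySem.List.pyGetD tablica i [])) then
    (PySem.List.pyRange 0 n 1).all (fun j =>
      decide ((0:Int) ∈ (PySem.List.pyRange 0 n 1).map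
        (fun i => PySem.List.pyGetD (PySem.List.pyGetD tablica i []) j 1)))
  else false

-- ===== PORT B =====
def czy_wystepuje_zero_alt (tablica : List (List Int)) : Bool :=
  let st := (PySem.List.enumerate tablica 0).foldl
    (fun st p => (PySem.List.enumerate p.2 0).foldl
      (fun st q =>
        if q.2 = 0 then (PySem.Set.add st.1 p.1, PySem.Set.add st.2 q.1) else st) st)
    ((PySem.Set.empty : PySem.Set Int), (PySem.Set.empty : PySem.Set Int))
  let n : Int := (tablica.length : Int)
  (PySem.List.pyRange 0 n 1).all (fun i => decide (i ∈ st.1)) &&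
  (PySem.List.pyRange 0 n 1).all (fun j => decide (j ∈ st.2))

-- ===== PRECONDITION & SPEC =====
-- Pre_ admits exactly the inputs on which Python A returns: either some row has no zero (A
-- returns False before touching columns), or every row has length ≥ n (all column builds
-- succeed), or some fully in-range column among the first n has no zero (A returns False at
-- that column before the IndexError). Outside Pre_ A raises IndexError.
def Pre_czy_wystepuje_zero (tablica : List (List Int)) : Prop :=
  (∃ r ∈ tablica, (0:Int) ∉ r) ∨
  (∀ r ∈ tablica, tablica.length ≤ r.length) ∨
  (∃ j < tablica.length, (∀ r ∈ tablica, j < r.length) ∧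
     ∀ i < tablica.length, (tablica.getD i []).getD j 1 ≠ 0)
instance (tablica : List (List Int)) : Decidable (Pre_czy_wystepuje_zero tablica) := by
  unfold Pre_czy_wystepuje_zero; infer_instance
def pvWitness_czy_wystepuje_zero : List (List Int) := [[1, 0], [0, 1]]

def Spec_czy_wystepuje_zero (tablica : List (List Int)) (out : Bool) : Prop := out = czy_wystepuje_zero_alt tablica
instance (tablica : List (List Int)) (out : Bool) : Decidable (Spec_czy_wystepuje_zero tablica out) := by unfold Spec_czy_wystepuje_zero; infer_instance

-- ===== CLAIM (what is proved, stated in full; the proofs are below) =====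
def Claim_equal_czy_wystepuje_zero : Prop := ∀ (tablica : List (List Int)), Dom_czy_wystepuje_zero tablica → Pre_czy_wystepuje_zero tablica → Spec_czy_wystepuje_zero tablica (czy_wystepuje_zero tablica)

-- ===== LEMMAS AND PROOFS =====

lemma pv_bool_eq_of_iff {a b : Bool} (h : a = true ↔ b = true) : a = b := by
  cases a <;> cases b <;> simp_all

-- the cell step of B's single pass, with the row index i fixed
def pvStep (i : Int) (st : PySem.Set Int × PySem.Set Int) (q : Int × Int) :
    PySem.Set Int × PySem.Set Int :=
  if q.2 = 0 then (PySem.Set.add st.1 i, PySem.Set.add st.2 q.1) else st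

lemma pv_inner_mem (i : Int) (row : List Int) (s : Int)
    (st : PySem.Set Int × PySem.Set Int) (x : Int) :
    (x ∈ ((PySem.List.enumerate row s).foldl (pvStep i) st).1 ↔
       x ∈ st.1 ∨ ((0:Int) ∈ row ∧ x = i)) ∧
    (x ∈ ((PySem.List.enumerate row s).foldl (pvStep i) st).2 ↔
       x ∈ st.2 ∨ ∃ j : Nat, j < row.length ∧ row.getD j 0 = 0 ∧ x = s + j) := by
  induction row generalizing s st with
  | nil => simp [PySem.List.enumerate_nil]
  | cons v rest ih =>
    rw [PySem.List.enumerate_cons]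
    simp only [List.foldl_cons]
    have h := ih (s + 1) (pvStep i st (s, v))
    have hst1 : x ∈ (pvStep i st (s, v)).1 ↔ x ∈ st.1 ∨ (v = 0 ∧ x = i) := by
      unfold pvStep
      by_cases hv : v = 0
      · simp [hv, PySem.Set.mem_add]
      · simp [hv]
    have hst2 : x ∈ (pvStep i st (s, v)).2 ↔ x ∈ st.2 ∨ (v = 0 ∧ x = s) := by
      unfold pvStep
      by_cases hv : v = 0
      · simp [hv, PySem.Set.mem_add]
      · simp [hv]
    constructor
    · rw [h.1, hst1]
      constructor
      · rintro ((hx | ⟨hv, hx⟩) | ⟨hm, hx⟩)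
        · exact Or.inl hx
        · exact Or.inr ⟨hv ▸ List.mem_cons_self, hx⟩
        · exact Or.inr ⟨List.mem_cons_of_mem _ hm, hx⟩
      · rintro (hx | ⟨hm, hx⟩)
        · exact Or.inl (Or.inl hx)
        · rcases List.mem_cons.1 hm with hv | hm
          · exact Or.inl (Or.inr ⟨hv.symm, hx⟩)
          · exact Or.inr ⟨hm, hx⟩
    · rw [h.2, hst2]
      constructor
      · rintro ((hx | ⟨hv, hx⟩) | ⟨j, hj, h0, hx⟩)
        · exact Or.inl hx
        · exact Or.inr ⟨0, by simp, by simpa using hv, by omega⟩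
        · exact Or.inr ⟨j + 1, by simpa using hj, by simpa using h0, by push_cast; omega⟩
      · rintro (hx | ⟨j, hj, h0, hx⟩)
        · exact Or.inl (Or.inl hx)
        · cases j with
          | zero =>
            simp only [List.getD_cons_zero] at h0
            exact Or.inl (Or.inr ⟨h0, by omega⟩)
          | succ j =>
            refine Or.inr ⟨j, by simpa using hj, by simpa using h0, by push_cast at hx ⊢; omega⟩

lemma pv_outer_mem (t : List (List Int)) (s : Int)
    (st : PySem.Set Int × PySem.Set Int) (x : Int) :
    (x ∈ ((PySem.List.enumerate t s).foldl
        (fun st p => (PySem.List.enumerate p.2 0).foldl (pvStep p.1) st) st).1 ↔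
       x ∈ st.1 ∨ ∃ k : Nat, k < t.length ∧ (0:Int) ∈ t.getD k [] ∧ x = s + k) ∧
    (x ∈ ((PySem.List.enumerate t s).foldl
        (fun st p => (PySem.List.enumerate p.2 0).foldl (pvStep p.1) st) st).2 ↔
       x ∈ st.2 ∨ ∃ k : Nat, k < t.length ∧ ∃ j : Nat, j < (t.getD k []).length ∧
         (t.getD k []).getD j 0 = 0 ∧ x = (j : Int)) := by
  induction t generalizing s st with
  | nil => simp [PySem.List.enumerate_nil]
  | cons row rest ih =>
    rw [PySem.List.enumerate_cons]
    simp only [List.foldl_cons]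
    have h := ih (s + 1) ((PySem.List.enumerate row 0).foldl (pvStep s) st)
    have hin := pv_inner_mem s row 0 st x
    constructor
    · rw [h.1, hin.1]
      constructor
      · rintro ((hx | ⟨hz, hx⟩) | ⟨k, hk, hz, hx⟩)
        · exact Or.inl hx
        · exact Or.inr ⟨0, by simp, by simpa using hz, by omega⟩
        · exact Or.inr ⟨k + 1, by simpa using hk, by simpa using hz, by push_cast; omega⟩
      · rintro (hx | ⟨k, hk, hz, hx⟩)
        · exact Or.inl (Or.inl hx)
        · cases k with
          | zero => exact Or.inl (Or.inr ⟨by simpa using hz, by omega⟩)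
          | succ k =>
            exact Or.inr ⟨k, by simpa using hk, by simpa using hz, by push_cast at hx ⊢; omega⟩
    · rw [h.2, hin.2]
      constructor
      · rintro ((hx | ⟨j, hj, h0, hx⟩) | ⟨k, hk, j, hj, h0, hx⟩)
        · exact Or.inl hx
        · exact Or.inr ⟨0, by simp, j, by simpa using hj, by simpa using h0, by omega⟩
        · exact Or.inr ⟨k + 1, by simpa using hk, j, by simpa using hj, by simpa using h0, hx⟩
      · rintro (hx | ⟨k, hk, j, hj, h0, hx⟩)
        · exact Or.inl (Or.inl hx)
        · cases k with
          | zero =>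
            exact Or.inl (Or.inr ⟨j, by simpa using hj, by simpa using h0, by omega⟩)
          | succ k =>
            exact Or.inr ⟨k, by simpa using hk, j, by simpa using hj, by simpa using h0, hx⟩

lemma pvB_true_iff (t : List (List Int)) :
    czy_wystepuje_zero_alt t = true ↔
      (∀ i < t.length, (0:Int) ∈ t.getD i []) ∧
      (∀ j < t.length, ∃ i < t.length,
        j < (t.getD i []).length ∧ (t.getD i []).getD j 0 = 0) := by
  unfold czy_wystepuje_zero_alt
  rw [show (fun (st : PySem.Set Int × PySem.Set Int) (p : Int × List Int) =>
      (PySem.List.enumerate p.2 0).foldl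
        (fun st q => if q.2 = 0 then (PySem.Set.add st.1 p.1, PySem.Set.add st.2 q.1) else st) st)
    = (fun st p => (PySem.List.enumerate p.2 0).foldl (pvStep p.1) st) from rfl]
  simp only [PySem.List.pyRange_zero_natCast, List.all_map, Bool.and_eq_true,
    List.all_eq_true]
  constructor
  · rintro ⟨h1, h2⟩
    constructor
    · intro i hi
      have hv := of_decide_eq_true (h1 i (List.mem_range.2 hi))
      rw [(pv_outer_mem t 0 _ _).1] at hv
      rcases hv with hx | ⟨k, hk, hz, hx⟩
      · simp [PySem.Set.empty] at hx
      · have : k = i := by simp at hx; omega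
        exact this ▸ hz
    · intro j hj
      have hv := of_decide_eq_true (h2 j (List.mem_range.2 hj))
      rw [(pv_outer_mem t 0 _ _).2] at hv
      rcases hv with hx | ⟨k, hk, j', hj', h0, hx⟩
      · simp [PySem.Set.empty] at hx
      · have : j' = j := by simp at hx; omega
        subst this
        exact ⟨k, hk, hj', h0⟩
  · rintro ⟨h1, h2⟩
    constructor
    · intro i him
      apply decide_eq_true
      rw [(pv_outer_mem t 0 _ _).1]
      have hi := List.mem_range.1 him
      exact Or.inr ⟨i, hi, h1 i hi, by simp⟩
    · intro j hjm
      apply decide_eq_true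
      rw [(pv_outer_mem t 0 _ _).2]
      have hj := List.mem_range.1 hjm
      obtain ⟨i, hi, hl, h0⟩ := h2 j hj
      exact Or.inr ⟨i, hi, j, hl, h0, rfl⟩

lemma pvA_true_iff (t : List (List Int)) :
    czy_wystepuje_zero t = true ↔
      (∀ i < t.length, (0:Int) ∈ t.getD i []) ∧
      (∀ j < t.length, ∃ i < t.length, (t.getD i []).getD j 1 = 0) := by
  simp only [czy_wystepuje_zero, PySem.List.pyRange_zero_natCast,
    List.all_map, List.map_map, Function.comp_def, PySem.List.pyGetD_natCast]
  by_cases hrows : ∀ i < t.length, (0:Int) ∈ t.getD i []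
  · rw [if_pos (by
      rw [List.all_eq_true]
      intro i him
      exact decide_eq_true (hrows i (List.mem_range.1 him)))]
    constructor
    · intro h
      refine ⟨hrows, ?_⟩
      intro j hj
      rw [List.all_eq_true] at h
      have h' := of_decide_eq_true (h j (List.mem_range.2 hj))
      obtain ⟨i, hi, h0⟩ := List.mem_map.1 h'
      exact ⟨i, List.mem_range.1 hi, h0⟩
    · rintro ⟨-, h2⟩
      rw [List.all_eq_true]
      intro j hjm
      obtain ⟨i, hi, h0⟩ := h2 j (List.mem_range.1 hjm)
      exact decide_eq_true (List.mem_map.2 ⟨i, List.mem_range.2 hi, h0⟩)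
  · rw [if_neg]
    · constructor
      · intro h
        exact absurd h (by simp)
      · rintro ⟨h1, -⟩
        exact absurd h1 hrows
    · intro hall
      apply hrows
      intro i hi
      rw [List.all_eq_true] at hall
      exact of_decide_eq_true (hall i (List.mem_range.2 hi))

-- ===== VERDICT (by name: the statement is the Claim_ definition above) =====
theorem czy_wystepuje_zero_spec : Claim_equal_czy_wystepuje_zero := by
  intro t _ hpre
  show czy_wystepuje_zero t = czy_wystepuje_zero_alt t
  apply pv_bool_eq_of_iff
  rw [pvA_true_iff, pvB_true_iff]
  rcases hpre with ⟨r, hr, hno⟩ | hlen | ⟨j, hj, hall, hnone⟩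
  · obtain ⟨i, hi, heq⟩ := List.mem_iff_getElem.1 hr
    have hgd : t.getD i [] = r := by rw [List.getD_eq_getElem _ _ hi, heq]
    constructor <;> rintro ⟨h1, -⟩ <;>
      exact absurd (hgd ▸ h1 i hi) hno
  · have key : ∀ j < t.length,
        ((∃ i < t.length, (t.getD i []).getD j 1 = 0) ↔
         (∃ i < t.length, j < (t.getD i []).length ∧ (t.getD i []).getD j 0 = 0)) := by
      intro j hj
      constructor
      · rintro ⟨i, hi, h⟩
        have hmem : t.getD i [] ∈ t := by
          rw [List.getD_eq_getElem _ _ hi]; exact List.getElem_mem hi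
        have hl : j < (t.getD i []).length := lt_of_lt_of_le hj (hlen _ hmem)
        rw [List.getD_eq_getElem _ _ hl] at h
        exact ⟨i, hi, hl, by rw [List.getD_eq_getElem _ _ hl]; exact h⟩
      · rintro ⟨i, hi, hl, h⟩
        rw [List.getD_eq_getElem _ _ hl] at h
        exact ⟨i, hi, by rw [List.getD_eq_getElem _ _ hl]; exact h⟩
    constructor
    · rintro ⟨h1, h2⟩
      exact ⟨h1, fun j hj => (key j hj).1 (h2 j hj)⟩
    · rintro ⟨h1, h2⟩
      exact ⟨h1, fun j hj => (key j hj).2 (h2 j hj)⟩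
  · constructor
    · rintro ⟨h1, h2⟩
      obtain ⟨i, hi, hz⟩ := h2 j hj
      exact absurd hz (hnone i hi)
    · rintro ⟨h1, h2⟩
      obtain ⟨i, hi, hl, h0⟩ := h2 j hj
      rw [List.getD_eq_getElem _ _ hl] at h0
      have hz : (t.getD i []).getD j 1 = 0 := by
        rw [List.getD_eq_getElem _ _ hl]; exact h0
      exact absurd hz (hnone i hi)
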